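-- pv_equiv track=rewrite | github.com/mithrantir/CodinGame | practice/puzzles/easy/oneD_Bush Fire.py | calculate_drops
-- ===== SOURCE A (Python) =====
-- def calculate_drops(s):
--     s_l, n, dr, ls = [c for c in s], 0, 0, len(s)
--     while n < ls:
--         while s_l[n] == '.':
--             n += 1
--             if n == ls:
--                 break
--         if n == ls:
--             break
--         elif n >= ls-2:
--             dr += 1
--             break
--         else:
--             n, dr = n+3, dr+1
--     return dr
-- ===== SOURCE B (Python) =====
-- def calculate_drops(s):
--     drops, reach, pos = 0, -1, 0
--     for run in s.split('.'):
--         start = pos if pos > reach else reach + 1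
--         end = pos + len(run)
--         if start < end:
--             d = -((start - end) // 3)
--             drops += d
--             reach = start + 3 * d - 1
--         pos = end + 1
--     return drops
-- ===== Notes on version B (the rewrite author's own statement) =====
-- stated objective: faster
-- what changed: Replaces A's per-cell Python-level cursor scan (skip dots, jump by 3) with a run-based computation: split the string on the dot separator, then for each fire run compute the number of drops in closed form by ceiling division of the uncovered run length by 3, carrying a covered-reach across runs.
import Mathlib
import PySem

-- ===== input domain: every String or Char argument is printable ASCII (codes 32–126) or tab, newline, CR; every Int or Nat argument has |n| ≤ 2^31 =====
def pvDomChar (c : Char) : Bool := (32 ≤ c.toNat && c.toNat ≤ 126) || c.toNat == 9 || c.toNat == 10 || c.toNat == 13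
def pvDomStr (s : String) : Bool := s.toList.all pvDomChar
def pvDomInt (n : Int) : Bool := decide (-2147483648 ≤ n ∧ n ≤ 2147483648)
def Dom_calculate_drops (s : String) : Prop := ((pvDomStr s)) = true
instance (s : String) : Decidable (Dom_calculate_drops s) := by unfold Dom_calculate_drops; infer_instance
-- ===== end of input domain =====

-- B replaces A's per-cell cursor scan (skip dots, jump by 3) by a run-based computation:
-- split on '.', then one closed-form ceiling division per fire run, carrying a covered-reach.

-- ===== PORT A =====
-- inner 'while s_l[n] == '.'' loop of A: returns the first index ≥ n holding a non-dot, capped at ls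
-- (l.getD n ' ' is exact here: the loop only reads in-range indices)
def pvSkipA (l : List Char) (ls n : Nat) : Nat :=
  if _h : n < ls then
    if l.getD n ' ' = '.' then pvSkipA l ls (n + 1) else n
  else n
termination_by ls - n

-- cited by pvLoopA's decreasing_by
theorem pvSkipA_ge (l : List Char) (ls : Nat) : ∀ k n, ls - n ≤ k → n ≤ pvSkipA l ls n := by
  intro k
  induction k with
  | zero => intro n h; rw [pvSkipA]; split_ifs with h1 h2 <;> omega
  | succ k ih =>
    intro n h; rw [pvSkipA]; split_ifs with h1 h2
    · exact le_trans (Nat.le_succ n) (ih (n + 1) (by omega))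
    · exact le_refl n
    · exact le_refl n

-- outer while loop of A, carrying the cursor n and the drop count dr
def pvLoopA (l : List Char) (ls n : Nat) (dr : Int) : Int :=
  if _h : n < ls then
    let n' := pvSkipA l ls n
    if n' = ls then dr
    else if (n' : Int) ≥ (ls : Int) - 2 then dr + 1
    else pvLoopA l ls (n' + 3) (dr + 1)
  else dr
termination_by ls - n
decreasing_by have := pvSkipA_ge l ls (ls - n) n (by omega); omega

def calculate_drops (s : String) : Int := pvLoopA s.toList s.toList.length 0 0

-- ===== PORT B =====
-- one step of B's 'for run in s.split('.')' loop; state = (drops, reach, pos)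
def pvStepB (st : Int × Int × Int) (run : String) : Int × Int × Int :=
  let start := if st.2.1 < st.2.2 then st.2.2 else st.2.1 + 1
  let e := st.2.2 + PySem.Str.len run
  if start < e then
    let d := -(PySem.Int.floordiv (start - e) 3)
    (st.1 + d, start + 3 * d - 1, e + 1)
  else (st.1, st.2.1, e + 1)

def calculate_drops_alt (s : String) : Int :=
  (((PySem.Str.split? s ".").getD []).foldl pvStepB (0, -1, 0)).1

-- ===== PRECONDITION & SPEC =====
def Spec_calculate_drops (s : String) (out : Int) : Prop := out = calculate_drops_alt s
instance (s : String) (out : Int) : Decidable (Spec_calculate_drops s out) := by unfold Spec_calculate_drops; infer_instance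

-- ===== CLAIM (what is proved, stated in full; the proofs are below) =====
def Claim_equal_calculate_drops : Prop := ∀ (s : String), Dom_calculate_drops s → Spec_calculate_drops s (calculate_drops s)

-- ===== LEMMAS AND PROOFS =====

-- the greedy per-fire step both sides are reduced to: state (count, reach)
def pvFoldB (p : Int × Int) (i : Int) : Int × Int :=
  if p.2 < i then (p.1 + 1, i + 2) else p

-- the list of fire indices of l, indexed from off
def pvFires (off : Int) (l : List Char) : List Int :=
  match l with
  | [] => []
  | c :: t => (if c ≠ '.' then [off] else []) ++ pvFires (off + 1) t

theorem pvFires_bounds (l : List Char) : ∀ (off i : Int), i ∈ pvFires off l → off ≤ i ∧ i < off + l.length := by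
  induction l with
  | nil => intro off i h; simp [pvFires] at h
  | cons c t ih =>
    intro off i h
    simp only [pvFires, List.mem_append] at h
    rcases h with h | h
    · have hio : i = off := by split_ifs at h <;> simp_all
      subst hio
      simp only [List.length_cons]
      push_cast
      omega
    · have := ih (off + 1) i h
      simp only [List.length_cons]
      push_cast
      omega

theorem pvFires_drop_step (l : List Char) (n : Nat) (hn : n < l.length) :
    pvFires (n : Int) (l.drop n) =
      (if l.getD n ' ' ≠ '.' then [(n : Int)] else []) ++ pvFires ((n : Int) + 1) (l.drop (n + 1)) := by
  rw [List.drop_eq_getElem_cons hn]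
  simp [pvFires, List.getD_eq_getElem?_getD, List.getElem?_eq_getElem hn]

theorem pvFires_append (u v : List Char) : ∀ p : Int,
    pvFires p (u ++ v) = pvFires p u ++ pvFires (p + u.length) v := by
  induction u with
  | nil => intro p; simp [pvFires]
  | cons c t ih =>
    intro p
    simp only [List.cons_append, pvFires, List.append_assoc, ih (p + 1), List.length_cons]
    push_cast
    ring_nf

-- fold with a shifted count: the reach component is independent of the count
theorem pvFold_shift (L : List Int) : ∀ (c r : Int),
    L.foldl pvFoldB (c, r) = (c + (L.foldl pvFoldB (0, r)).1, (L.foldl pvFoldB (0, r)).2) := by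
  induction L with
  | nil => intro c r; simp
  | cons i L ih =>
    intro c r
    by_cases h : r < i
    · have e1 : pvFoldB (c, r) i = (c + 1, i + 2) := by simp [pvFoldB, h]
      have e2 : pvFoldB (0, r) i = (1, i + 2) := by simp [pvFoldB, h]
      rw [List.foldl_cons, List.foldl_cons, e1, e2, ih (c + 1), ih 1]
      simp only [Prod.mk.injEq]
      exact ⟨by ring, by trivial⟩
    · have e1 : pvFoldB (c, r) i = (c, r) := by simp [pvFoldB, h]
      have e2 : pvFoldB (0, r) i = (0, r) := by simp [pvFoldB, h]
      rw [List.foldl_cons, List.foldl_cons, e1, e2]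
      exact ih c r

-- elements already covered do not change the state
theorem pvFold_covered (L : List Int) : ∀ (c r : Int), (∀ i ∈ L, i ≤ r) → L.foldl pvFoldB (c, r) = (c, r) := by
  induction L with
  | nil => intro c r _; rfl
  | cons i L ih =>
    intro c r h
    have hi : i ≤ r := h i (by simp)
    have e : pvFoldB (c, r) i = (c, r) := by simp [pvFoldB]; omega
    rw [List.foldl_cons, e]
    exact ih c r (fun j hj => h j (by simp [hj]))

theorem pvSkipA_le (l : List Char) (ls : Nat) : ∀ k n, ls - n ≤ k → n ≤ ls → pvSkipA l ls n ≤ ls := by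
  intro k
  induction k with
  | zero =>
    intro n h hn
    rw [pvSkipA]
    split_ifs with h1 h2 <;> omega
  | succ k ih =>
    intro n h hn
    rw [pvSkipA]
    split_ifs with h1 h2
    · exact ih (n + 1) (by omega) (by omega)
    · omega
    · omega

theorem pvSkipA_hit (l : List Char) (ls : Nat) : ∀ k n, ls - n ≤ k →
    pvSkipA l ls n < ls → l.getD (pvSkipA l ls n) ' ' ≠ '.' := by
  intro k
  induction k with
  | zero =>
    intro n h hlt
    rw [pvSkipA] at hlt ⊢
    split_ifs at hlt ⊢ with h1 h2
    · omega
    · exact h2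
    · omega
  | succ k ih =>
    intro n h hlt
    rw [pvSkipA] at hlt ⊢
    split_ifs at hlt ⊢ with h1 h2
    · exact ih (n + 1) (by omega) hlt
    · exact h2
    · omega

-- skipping dots does not change the fire list
theorem pvSkipA_fires (l : List Char) : ∀ k n, l.length - n ≤ k → n ≤ l.length →
    pvFires (n : Int) (l.drop n) = pvFires ((pvSkipA l l.length n : Nat) : Int) (l.drop (pvSkipA l l.length n)) := by
  intro k
  induction k with
  | zero =>
    intro n h hn
    rw [pvSkipA]
    split_ifs with h1 h2
    · omega
    · rfl
    · rfl
  | succ k ih =>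
    intro n h hn
    rw [pvSkipA]
    split_ifs with h1 h2
    · rw [pvFires_drop_step l n h1, if_neg (not_not.mpr h2), List.nil_append]
      have := ih (n + 1) (by omega) (by omega)
      push_cast at this ⊢
      exact this
    · rfl
    · rfl

-- the A-side invariant: A's loop from cursor n equals dr plus the greedy fold over the fires from n,
-- for any reach r strictly below n
theorem pvMain (l : List Char) : ∀ k (n : Nat) (r dr : Int), l.length - n ≤ k → r < (n : Int) →
    pvLoopA l l.length n dr = dr + ((pvFires (n : Int) (l.drop n)).foldl pvFoldB (0, r)).1 := by
  intro k
  induction k with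
  | zero =>
    intro n r dr h hr
    rw [pvLoopA, dif_neg (by omega : ¬ n < l.length), List.drop_eq_nil_of_le (by omega)]
    simp [pvFires]
  | succ k ih =>
    intro n r dr h hr
    rw [pvLoopA]
    by_cases hn : n < l.length
    · rw [dif_pos hn]
      set n' := pvSkipA l l.length n with hn'
      have hge : n ≤ n' := pvSkipA_ge l l.length (l.length - n) n (by omega)
      have hle : n' ≤ l.length := pvSkipA_le l l.length (l.length - n) n (by omega) (by omega)
      have hfeq : pvFires (n : Int) (l.drop n) = pvFires (n' : Int) (l.drop n') :=
        pvSkipA_fires l (l.length - n) n (by omega) (by omega)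
      rw [hfeq]
      by_cases hend : n' = l.length
      · rw [if_pos hend, hend, List.drop_length]
        simp [pvFires]
      · rw [if_neg hend]
        have hlt : n' < l.length := by omega
        have hhit : l.getD n' ' ' ≠ '.' := pvSkipA_hit l l.length (l.length - n) n (by omega) hlt
        rw [pvFires_drop_step l n' hlt, if_pos hhit]
        simp only [List.singleton_append, List.foldl_cons]
        have htrig : pvFoldB (0, r) (n' : Int) = (1, (n' : Int) + 2) := by
          simp only [pvFoldB]
          rw [if_pos (by omega : r < (n' : Int))]
          norm_num
        rw [htrig]
        by_cases hnear : ((n' : Int) ≥ (l.length : Int) - 2)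
        · rw [if_pos hnear]
          have hcov : ∀ i ∈ pvFires ((n' : Int) + 1) (l.drop (n' + 1)), i ≤ (n' : Int) + 2 := by
            intro i hi
            have := pvFires_bounds (l.drop (n' + 1)) ((n' : Int) + 1) i hi
            rw [List.length_drop] at this
            omega
          rw [pvFold_covered _ 1 ((n' : Int) + 2) hcov]
        · rw [if_neg hnear]
          have h1 : n' + 1 < l.length := by omega
          have h2 : n' + 2 < l.length := by omega
          have hs1 := pvFires_drop_step l (n' + 1) h1
          have hs2 := pvFires_drop_step l (n' + 2) h2
          have hrec := ih (n' + 3) ((n' : Int) + 2) (dr + 1) (by omega) (by push_cast; omega)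
          push_cast at hs1 hs2 hrec
          rw [hs1, List.foldl_append]
          have hskip1 : ((if l.getD (n' + 1) ' ' ≠ '.' then [(n' : Int) + 1] else []).foldl pvFoldB (1, (n' : Int) + 2)) = (1, (n' : Int) + 2) := by
            split_ifs
            · simp only [List.foldl_cons, List.foldl_nil, pvFoldB]
              rw [if_neg (by omega)]
            · rfl
          rw [hskip1]
          rw [show (n' : Int) + 1 + 1 = (n' : Int) + 2 from by ring, show n' + 1 + 1 = n' + 2 from by omega]
          rw [hs2, List.foldl_append]
          have hskip2 : ((if l.getD (n' + 2) ' ' ≠ '.' then [(n' : Int) + 2] else []).foldl pvFoldB (1, (n' : Int) + 2)) = (1, (n' : Int) + 2) := by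
            split_ifs
            · simp only [List.foldl_cons, List.foldl_nil, pvFoldB]
              rw [if_neg (by omega)]
            · rfl
          rw [hskip2]
          rw [show (n' : Int) + 2 + 1 = (n' : Int) + 3 from by ring, show n' + 2 + 1 = n' + 3 from by omega]
          rw [hrec]
          have := pvFold_shift ((pvFires ((n' : Int) + 3) (l.drop (n' + 3)))) 1 ((n' : Int) + 2)
          rw [this]
          ring
    · rw [dif_neg hn, List.drop_eq_nil_of_le (by omega)]
      simp [pvFires]

-- ============ B-side lemmas ============

-- reference model of s.split('.') on character lists
def pvSplitDot : List Char → List (List Char)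
  | [] => [[]]
  | c :: t =>
    if c = '.' then [] :: pvSplitDot t
    else
      match pvSplitDot t with
      | [] => [[c]]
      | h :: tl => (c :: h) :: tl

theorem pvSplitDot_ne_nil (l : List Char) : pvSplitDot l ≠ [] := by
  cases l with
  | nil => simp [pvSplitDot]
  | cons c t =>
    simp only [pvSplitDot]
    split_ifs
    · simp
    · rcases h : pvSplitDot t with _ | ⟨h', tl⟩ <;> simp

-- cur.reverse prepended onto the first piece
def pvConsHead (pre : List Char) : List (List Char) → List (List Char)
  | [] => [pre]
  | h :: tl => (pre ++ h) :: tl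

theorem pvGo_eq (l : List Char) : ∀ fuel, l.length ≤ fuel → ∀ (cur : List Char) (acc : List (List Char)),
    PySem.Chars.splitOn.go ['.'] fuel l cur acc = acc.reverse ++ pvConsHead cur.reverse (pvSplitDot l) := by
  induction l with
  | nil =>
    intro fuel _ cur acc
    cases fuel <;> simp [PySem.Chars.splitOn.go, pvSplitDot, pvConsHead]
  | cons c rest ih =>
    intro fuel hf cur acc
    cases fuel with
    | zero => simp at hf
    | succ f =>
      have hstep : PySem.Chars.splitOn.go ['.'] (f+1) (c :: rest) cur acc =
          if ['.'].isPrefixOf (c :: rest) then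
            PySem.Chars.splitOn.go ['.'] f (List.drop 1 (c :: rest)) [] (cur.reverse :: acc)
          else PySem.Chars.splitOn.go ['.'] f rest (c :: cur) acc := rfl
      rw [hstep]
      by_cases hc : c = '.'
      · rw [if_pos (by simp [List.isPrefixOf, hc])]
        simp only [List.drop_one, List.tail_cons]
        rw [ih f (by simpa using hf) [] (cur.reverse :: acc)]
        simp [pvSplitDot, hc]
        rcases hsp : pvSplitDot rest with _ | ⟨h', tl⟩
        · exact absurd hsp (pvSplitDot_ne_nil rest)
        · simp [pvConsHead]
      · rw [if_neg (by simp [List.isPrefixOf]; exact fun h => hc h.symm)]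
        rw [ih f (by simpa using hf) (c :: cur) acc]
        simp only [pvSplitDot, if_neg hc]
        rcases hsp : pvSplitDot rest with _ | ⟨h', tl⟩
        · exact absurd hsp (pvSplitDot_ne_nil rest)
        · simp [pvConsHead]

theorem pvSplitOn_eq (l : List Char) : PySem.Chars.splitOn l ['.'] = pvSplitDot l := by
  have h := pvGo_eq l (l.length + 1) (by omega) [] []
  rcases hsp : pvSplitDot l with _ | ⟨h', tl⟩
  · exact absurd hsp (pvSplitDot_ne_nil l)
  · rw [hsp] at h
    simpa [PySem.Chars.splitOn, pvConsHead] using h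

-- undo the split: '.'-joining the pieces gives back the string
def pvJoinDot : List (List Char) → List Char
  | [] => []
  | [x] => x
  | x :: y :: rest => x ++ '.' :: pvJoinDot (y :: rest)

theorem pvJoin_split (l : List Char) : pvJoinDot (pvSplitDot l) = l := by
  induction l with
  | nil => rfl
  | cons c t ih =>
    simp only [pvSplitDot]
    by_cases hc : c = '.'
    · rw [if_pos hc]
      rcases hsp : pvSplitDot t with _ | ⟨h', tl⟩
      · exact absurd hsp (pvSplitDot_ne_nil t)
      · rw [hsp] at ih
        simp only [pvJoinDot, List.nil_append, hc]
        rw [ih]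
    · rw [if_neg hc]
      rcases hsp : pvSplitDot t with _ | ⟨h', tl⟩
      · exact absurd hsp (pvSplitDot_ne_nil t)
      · rw [hsp] at ih
        cases tl with
        | nil => simpa [pvJoinDot] using congrArg (c :: ·) ih
        | cons y rest => simpa [pvJoinDot] using congrArg (c :: ·) ih

theorem pvSplitDot_no_dot (l : List Char) : ∀ part ∈ pvSplitDot l, '.' ∉ part := by
  induction l with
  | nil =>
    intro p hp
    have hpe : p = [] := by simpa [pvSplitDot] using hp
    simp [hpe]
  | cons c t ih =>
    intro p hp
    by_cases hc : c = '.'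
    · rw [show pvSplitDot (c :: t) = [] :: pvSplitDot t from by simp [pvSplitDot, hc]] at hp
      rcases List.mem_cons.mp hp with h | h
      · simp [h]
      · exact ih p h
    · rcases hsp : pvSplitDot t with _ | ⟨h', tl⟩
      · exact absurd hsp (pvSplitDot_ne_nil t)
      · rw [show pvSplitDot (c :: t) = (c :: h') :: tl from by simp [pvSplitDot, hc, hsp]] at hp
        rcases List.mem_cons.mp hp with h | h
        · subst h
          intro hmem
          rcases List.mem_cons.mp hmem with h | h
          · exact hc h.symm
          · exact ih h' (by rw [hsp]; exact List.mem_cons_self ..) h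
        · exact ih p (by rw [hsp]; exact List.mem_cons_of_mem _ h)

-- floor division by 3 is Euclidean division by 3 (omega-friendly)
theorem pvFdiv3 (a : Int) : PySem.Int.floordiv a 3 = a / 3 := by
  simp [PySem.Int.floordiv, Int.fdiv_eq_ediv]

-- the fires of a dot-free run are consecutive; the greedy fold over them has a closed form:
-- ceiling division of the uncovered part by 3
theorem pvRun (run : List Char) (hd : '.' ∉ run) : ∀ (p r c : Int),
    (pvFires p run).foldl pvFoldB (c, r) =
      if max p (r + 1) < p + run.length then
        (c + -((max p (r + 1) - (p + run.length)) / 3),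
         max p (r + 1) + 3 * -((max p (r + 1) - (p + run.length)) / 3) - 1)
      else (c, r) := by
  induction run with
  | nil =>
    intro p r c
    rw [if_neg (by simp only [List.length_nil, Nat.cast_zero, add_zero]; omega)]
    rfl
  | cons c0 t ih =>
    intro p r c
    have hc0 : c0 ≠ '.' := fun h => hd (by simp [h])
    have hdt : '.' ∉ t := fun h => hd (by simp [h])
    simp only [pvFires, if_pos hc0, List.singleton_append, List.foldl_cons, List.length_cons]
    by_cases hr : r < p
    · have e1 : pvFoldB (c, r) p = (c + 1, p + 2) := by simp [pvFoldB, hr]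
      rw [e1, ih hdt (p + 1) (p + 2) (c + 1)]
      have hmax1 : max (p + 1) (p + 2 + 1) = p + 3 := by omega
      have hmax2 : max p (r + 1) = p := by omega
      rw [hmax1, hmax2]
      by_cases hlong : p + 3 < p + 1 + (t.length : Int)
      · rw [if_pos hlong, if_pos (by push_cast; omega)]
        have harith : ∀ L : Int, 2 < L →
            (c + 1 + -((p + 3 - (p + 1 + L)) / 3), p + 3 + 3 * -((p + 3 - (p + 1 + L)) / 3) - 1)
              = (c + -((p - (p + (L + 1))) / 3), p + 3 * -((p - (p + (L + 1))) / 3) - 1) := by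
          intro L hL
          have h1 : p + 3 - (p + 1 + L) = -(L - 2) := by ring
          have h2 : p - (p + (L + 1)) = -(L + 1) := by ring
          rw [h1, h2]
          have : (-(L + 1)) / 3 = (-(L - 2)) / 3 - 1 := by omega
          rw [this]
          simp only [Prod.mk.injEq]
          constructor <;> ring
        push_cast
        exact harith (t.length : Int) (by omega)
      · rw [if_neg hlong, if_pos (by push_cast; omega)]
        have hL : (t.length : Int) ≤ 2 := by omega
        have h2 : p - (p + ((t.length : Int) + 1)) = -((t.length : Int) + 1) := by ring
        push_cast
        rw [h2]
        have hlen0 : (0:Int) ≤ (t.length : Int) := by positivity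
        have : (-((t.length : Int) + 1)) / 3 = -1 := by omega
        rw [this]
        simp only [Prod.mk.injEq]
        constructor <;> ring
    · have e1 : pvFoldB (c, r) p = (c, r) := by simp [pvFoldB, hr]
      rw [e1, ih hdt (p + 1) r c]
      have hmax1 : max (p + 1) (r + 1) = r + 1 := by omega
      have hmax2 : max p (r + 1) = r + 1 := by omega
      rw [hmax1, hmax2]
      have heq : p + 1 + (t.length : Int) = p + ((t.length : Int) + 1) := by ring
      rw [heq]
      push_cast
      rfl

-- the B-side step on character lists (pvStepB after moving to toList)
def pvStepB' (st : Int × Int × Int) (run : List Char) : Int × Int × Int :=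
  let start := if st.2.1 < st.2.2 then st.2.2 else st.2.1 + 1
  let e := st.2.2 + (run.length : Int)
  if start < e then
    let d := -(PySem.Int.floordiv (start - e) 3)
    (st.1 + d, start + 3 * d - 1, e + 1)
  else (st.1, st.2.1, e + 1)

-- one B step on a dot-free run equals the greedy fold over that run's fires
theorem pvStep_run (x : List Char) (hd : '.' ∉ x) (p r dr : Int) :
    pvStepB' (dr, r, p) x =
      (dr + ((pvFires p x).foldl pvFoldB (0, r)).1,
       ((pvFires p x).foldl pvFoldB (0, r)).2,
       p + x.length + 1) := by
  have hstart : (if r < p then p else r + 1) = max p (r + 1) := by split_ifs <;> omega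
  simp only [pvStepB']
  rw [hstart, pvRun x hd p r 0, pvFdiv3]
  split_ifs with hc
  · simp
  · simp

-- B's fold over the pieces equals the greedy fold over the fires of their '.'-join
theorem pvParts (rest : List (List Char)) : ∀ (x : List Char),
    (∀ pt ∈ x :: rest, '.' ∉ pt) → ∀ (p r dr : Int),
    (x :: rest).foldl pvStepB' (dr, r, p) =
      (dr + ((pvFires p (pvJoinDot (x :: rest))).foldl pvFoldB (0, r)).1,
       ((pvFires p (pvJoinDot (x :: rest))).foldl pvFoldB (0, r)).2,
       p + (pvJoinDot (x :: rest)).length + 1) := by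
  induction rest with
  | nil =>
    intro x hd p r dr
    simp only [List.foldl_cons, List.foldl_nil, pvJoinDot]
    exact pvStep_run x (hd x (by simp)) p r dr
  | cons y rest ih =>
    intro x hd p r dr
    rw [List.foldl_cons]
    rw [show pvStepB' (dr, r, p) x = _ from pvStep_run x (hd x (by simp)) p r dr]
    have hdy : ∀ pt ∈ y :: rest, '.' ∉ pt := fun pt hpt => hd pt (by simp at hpt ⊢; tauto)
    have ihy := ih y hdy (p + x.length + 1)
      ((pvFires p x).foldl pvFoldB (0, r)).2
      (dr + ((pvFires p x).foldl pvFoldB (0, r)).1)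
    rw [show ((y :: rest).foldl pvStepB' _) = _ from ihy]
    have hjoin : pvJoinDot (x :: y :: rest) = x ++ '.' :: pvJoinDot (y :: rest) := rfl
    have hfires : pvFires p (pvJoinDot (x :: y :: rest)) =
        pvFires p x ++ pvFires (p + x.length + 1) (pvJoinDot (y :: rest)) := by
      rw [hjoin, pvFires_append]
      simp [pvFires]
    rw [hfires, List.foldl_append]
    have hsh := pvFold_shift (pvFires (p + x.length + 1) (pvJoinDot (y :: rest)))
      ((pvFires p x).foldl pvFoldB (0, r)).1 ((pvFires p x).foldl pvFoldB (0, r)).2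
    rw [show ((pvFires p x).foldl pvFoldB (0, r)) =
        (((pvFires p x).foldl pvFoldB (0, r)).1, ((pvFires p x).foldl pvFoldB (0, r)).2) from rfl,
      hsh]
    simp only [Prod.mk.injEq, hjoin]
    refine ⟨by ring, trivial, ?_⟩
    simp only [List.length_append, List.length_cons]
    push_cast
    ring

-- ===== VERDICT (by name: the statement is the Claim_ definition above) =====
theorem calculate_drops_spec : Claim_equal_calculate_drops := by
  intro s _
  unfold Spec_calculate_drops calculate_drops calculate_drops_alt
  have hA := pvMain s.toList s.toList.length 0 (-1) 0 (by omega) (by norm_num)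
  simp only [List.drop_zero, Nat.cast_zero] at hA
  have hmap := PySem.Str.split?_map s "."
  rw [show PySem.Chars.split? s.toList ".".toList = some (pvSplitDot s.toList) from by
        simp [PySem.Chars.split?]; exact pvSplitOn_eq s.toList] at hmap
  rcases hsp : PySem.Str.split? s "." with _ | parts
  · rw [hsp] at hmap; simp at hmap
  · rw [hsp] at hmap
    simp only [Option.map_some, Option.some.injEq] at hmap
    simp only [Option.getD_some]
    have hfold : parts.foldl pvStepB ((0 : Int), (-1 : Int), (0 : Int)) =
        (parts.map String.toList).foldl pvStepB' ((0 : Int), (-1 : Int), (0 : Int)) := by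
      rw [List.foldl_map]
      rfl
    rw [hfold, hmap]
    rcases hone : pvSplitDot s.toList with _ | ⟨h', tl⟩
    · exact absurd hone (pvSplitDot_ne_nil s.toList)
    · have hdots : ∀ pt ∈ h' :: tl, '.' ∉ pt := by
        rw [← hone]; exact pvSplitDot_no_dot s.toList
      rw [pvParts tl h' hdots 0 (-1) 0]
      have hj : pvJoinDot (h' :: tl) = s.toList := by rw [← hone]; exact pvJoin_split s.toList
      rw [hj, hA]
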